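-- pv_equiv track=rewrite | github.com/Dazaa1/MarkMl | main.py | get_markdown
-- ===== SOURCE A (Python) =====
-- def get_markdown(content):
--     if not content:
--         return []
--     results = []
--     # Simplified check for .md files
--     if content[0].endswith(".md"):
--         results.append(content[0])
--
--     results.extend(get_markdown(content[1:]))
--     return results
-- ===== SOURCE B (Python) =====
-- def get_markdown(content):
--     if not content:
--         return []
--     results = []
--     for item in content:
--         if item.endswith(".md"):
--             results.append(item)
--     return results
-- ===== Notes on version B (the rewrite author's own statement) =====
-- stated objective: faster
-- what changed: Replaced the self-recursion on content[1:] (which rebuilds a list slice at every step) with a single iterative for-loop over content accumulating matches.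
import Mathlib
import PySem

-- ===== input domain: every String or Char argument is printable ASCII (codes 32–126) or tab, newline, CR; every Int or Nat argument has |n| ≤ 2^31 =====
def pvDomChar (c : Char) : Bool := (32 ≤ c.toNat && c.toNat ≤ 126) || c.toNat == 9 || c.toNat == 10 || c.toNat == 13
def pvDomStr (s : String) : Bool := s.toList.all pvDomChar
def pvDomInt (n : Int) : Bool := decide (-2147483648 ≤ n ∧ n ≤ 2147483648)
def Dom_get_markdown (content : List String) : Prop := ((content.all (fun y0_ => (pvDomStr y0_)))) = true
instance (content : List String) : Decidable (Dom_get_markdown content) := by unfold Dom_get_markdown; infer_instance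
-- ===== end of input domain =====

-- B replaces A's self-recursion over content[1:] with one iterative accumulator loop; same return value.

-- ===== PORT A =====
-- A: if not content: return []; maybe append content[0]; extend with recursion on content[1:]
def get_markdown (content : List String) : List String :=
  match content with
  | [] => []
  | x :: rest =>
    (if PySem.Str.endswith x ".md" then [x] else []) ++ get_markdown rest

-- ===== PORT B =====
-- B's for-loop with the results accumulator, as a fold over content
def get_markdown_alt (content : List String) : List String :=
  if content = [] then []
  else content.foldl (fun results item =>
    if PySem.Str.endswith item ".md" then results ++ [item] else results) []

-- ===== PRECONDITION & SPEC =====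
def Spec_get_markdown (content : List String) (out : List String) : Prop := out = get_markdown_alt content
instance (content : List String) (out : List String) : Decidable (Spec_get_markdown content out) := by unfold Spec_get_markdown; infer_instance

-- ===== CLAIM (what is proved, stated in full; the proofs are below) =====
def Claim_equal_get_markdown : Prop := ∀ (content : List String), Dom_get_markdown content → Spec_get_markdown content (get_markdown content)

-- ===== LEMMAS AND PROOFS =====
theorem gm_foldl_acc (content : List String) (acc : List String) :
    content.foldl (fun results item =>
      if PySem.Str.endswith item ".md" then results ++ [item] else results) acc
      = acc ++ get_markdown content := by
  induction content generalizing acc with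
  | nil => simp [get_markdown]
  | cons x rest ih =>
    simp only [List.foldl_cons, get_markdown, ih]
    split <;> simp

-- ===== VERDICT (by name: the statement is the Claim_ definition above) =====
theorem get_markdown_spec : Claim_equal_get_markdown := by
  intro content _
  unfold Spec_get_markdown get_markdown_alt
  cases content with
  | nil => simp [get_markdown]
  | cons x rest =>
    simp only [List.foldl_cons, gm_foldl_acc, get_markdown]
    split <;> simp
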